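-- pv_equiv track=rewrite | github.com/DragosAndrei99/aqsm | aqsm_embedding_core/image_matrix_validator.py | validate_square_power_of_two
-- ===== SOURCE A (Python) =====
-- from typing import Sequence
--
-- def validate_square_power_of_two(image: Sequence[Sequence[int]]) -> int:
--     """Validate that an image is square and its side length is a power of two.
--
--     Args:
--         image: Nested list-like image matrix.
--
--     Returns:
--         The side exponent `s` for an image of size `2^s x 2^s`.
--     """
--
--     if not image:
--         raise ValueError("Image must not be empty.")
--
--     side = len(image)
--     if any(len(row) != side for row in image):
--         raise ValueError("Image must be square.")
--
--     if side & (side - 1):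
--         raise ValueError("Image side length must be a power of two.")
--
--     return side.bit_length() - 1
-- ===== SOURCE B (Python) =====
-- def validate_square_power_of_two(image):
--     if not image:
--         raise ValueError("Image must not be empty.")
--     side = len(image)
--     for row in image:
--         if len(row) != side:
--             raise ValueError("Image must be square.")
--     exp = 0
--     s = side
--     while s > 1:
--         if s & 1:
--             raise ValueError("Image side length must be a power of two.")
--         s >>= 1
--         exp += 1
--     return exp
-- ===== Notes on version B (the rewrite author's own statement) =====
-- stated objective: alternative
-- what changed: B replaces the bit-trick power-of-two test and bit_length arithmetic with a single halving loop that simultaneously detects odd factors and counts the exponent; the square check becomes an explicit early-exit loop instead of any()+generator.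
import Mathlib
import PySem

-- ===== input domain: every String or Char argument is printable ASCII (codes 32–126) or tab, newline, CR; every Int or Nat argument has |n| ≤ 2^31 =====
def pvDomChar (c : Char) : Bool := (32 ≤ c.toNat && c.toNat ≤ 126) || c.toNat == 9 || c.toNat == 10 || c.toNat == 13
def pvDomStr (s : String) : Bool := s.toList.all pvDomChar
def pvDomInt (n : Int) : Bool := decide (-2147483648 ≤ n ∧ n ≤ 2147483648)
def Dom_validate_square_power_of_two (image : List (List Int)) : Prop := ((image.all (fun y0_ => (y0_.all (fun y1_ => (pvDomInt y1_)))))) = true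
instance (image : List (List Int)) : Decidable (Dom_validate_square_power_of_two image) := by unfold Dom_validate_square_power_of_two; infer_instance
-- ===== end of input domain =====

-- B replaces A's bit-trick power-of-two test and bit_length arithmetic by a single halving
-- loop that detects odd factors and counts the exponent (alternative decomposition, same cost).


-- ===== PORT A =====
-- literal port of A; the three `raise ValueError` branches are outside Pre_ and return 0 there
def validate_square_power_of_two (image : List (List Int)) : Int :=
  if image = [] then 0
  else
    let side : Nat := image.length
    if image.any (fun row => row.length ≠ side) then 0
    else if PySem.Int.band (side : Int) ((side : Int) - 1) ≠ 0 then 0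
    else (PySem.Int.bitLength (side : Int) : Int) - 1

-- ===== PORT B =====
-- B's while-loop: halve s, counting shifts; an odd s > 1 is A's `raise` (outside Pre_, returns 0)
def pvAltLoop (s : Nat) (exp : Int) : Int :=
  if h : 1 < s then
    if s % 2 = 1 then 0 else pvAltLoop (s / 2) (exp + 1)
  else exp
termination_by s
decreasing_by exact Nat.div_lt_self (by omega) (by omega)

def validate_square_power_of_two_alt (image : List (List Int)) : Int :=
  if image = [] then 0
  else
    let side : Nat := image.length
    if image.any (fun row => row.length ≠ side) then 0
    else pvAltLoop side 0

-- ===== PRECONDITION & SPEC =====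
-- Pre_ = exactly where A returns: nonempty, square, side length a power of two (else ValueError)
def Pre_validate_square_power_of_two (image : List (List Int)) : Prop :=
  image ≠ [] ∧ (∀ row ∈ image, row.length = image.length) ∧
    image.length = 2 ^ Nat.log2 image.length
instance (image : List (List Int)) : Decidable (Pre_validate_square_power_of_two image) := by
  unfold Pre_validate_square_power_of_two; infer_instance
def pvWitness_validate_square_power_of_two : List (List Int) := [[1, 2], [3, 4]]

def Spec_validate_square_power_of_two (image : List (List Int)) (out : Int) : Prop := out = validate_square_power_of_two_alt image
instance (image : List (List Int)) (out : Int) : Decidable (Spec_validate_square_power_of_two image out) := by unfold Spec_validate_square_power_of_two; infer_instance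

-- ===== CLAIM (what is proved, stated in full; the proofs are below) =====
def Claim_equal_validate_square_power_of_two : Prop := ∀ (image : List (List Int)), Dom_validate_square_power_of_two image → Pre_validate_square_power_of_two image → Spec_validate_square_power_of_two image (validate_square_power_of_two image)

-- ===== LEMMAS AND PROOFS =====

lemma pvBitLength_two_pow (k : Nat) : PySem.Int.bitLength ((2 ^ k : Nat) : Int) = k + 1 := by
  induction k with
  | zero => decide
  | succ k ih =>
      rw [PySem.Int.bitLength_natCast (by positivity)]
      have h : 2 ^ (k + 1) / 2 = 2 ^ k := by omega
      rw [h, ih]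

lemma pvAltLoop_two_pow (k : Nat) : ∀ e : Int, pvAltLoop (2 ^ k) e = e + k := by
  induction k with
  | zero => intro e; simp [pvAltLoop]
  | succ k ih =>
      intro e
      rw [pvAltLoop]
      have h1 : 1 < 2 ^ (k + 1) := by
        have := Nat.one_le_two_pow (n := k); omega
      have h2 : 2 ^ (k + 1) % 2 = 0 := by omega
      have h3 : 2 ^ (k + 1) / 2 = 2 ^ k := by omega
      simp only [h1, dif_pos, h2, h3, ih]
      push_cast; ring

lemma pvBand_two_pow (k : Nat) :
    PySem.Int.band ((2 ^ k : Nat) : Int) (((2 ^ k : Nat) : Int) - 1) = 0 := by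
  have h1 : ((2 ^ k : Nat) : Int) - 1 = ((2 ^ k - 1 : Nat) : Int) := by
    have := Nat.one_le_two_pow (n := k); push_cast [this]; ring
  rw [h1, PySem.Int.band_natCast]
  have h2 : (2 ^ k - 1).testBit k = false :=
    Nat.testBit_eq_false_of_lt (by omega)
  rw [Nat.two_pow_and, h2]
  simp

-- ===== VERDICT (by name: the statement is the Claim_ definition above) =====
theorem validate_square_power_of_two_spec : Claim_equal_validate_square_power_of_two := by
  intro image _ hpre
  obtain ⟨hne, hsq, hpow⟩ := hpre
  unfold Spec_validate_square_power_of_two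
  unfold validate_square_power_of_two validate_square_power_of_two_alt
  have hany : image.any (fun row => row.length ≠ image.length) = false := by
    simp only [List.any_eq_false]
    intro row hr
    simp [hsq row hr]
  simp only [if_neg hne, hany, Bool.false_eq_true, if_false]
  rw [hpow, pvBand_two_pow, pvBitLength_two_pow, pvAltLoop_two_pow]
  simp
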